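-- pv_equiv track=rewrite | github.com/Developernation/codefights | cfights/python3_solutions/rounders.py | rounders
-- ===== SOURCE A (Python) =====
-- def rounders(value):
--         intVal = [int(elm) for elm in str(value)[::-1]]
--         for i in range(len(intVal)-1):
--                 if intVal[i] > 4:
--                         intVal[i] = 0
--                         intVal[i+1] += 1
--                 else:
--                         intVal[i] = 0
--         return int(''.join([str(elm) for elm in intVal[::-1]]))
-- ===== SOURCE B (Python) =====
-- def rounders(value):
--     # Scalar carry instead of digit-list mutation and string round-trip.
--     n, p, carry = value, 1, 0
--     while n >= 10:
--         n, d = divmod(n, 10)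
--         carry = 1 if d + carry > 4 else 0
--         p *= 10
--     return (n + carry) * p
-- ===== Notes on version B (the rewrite author's own statement) =====
-- stated objective: simpler
-- what changed: B replaces A's string round-trip (str, per-char int, in-place digit-list mutation, reverse+join+int reparse) by a single arithmetic divmod loop that keeps only a scalar carry and a power-of-ten accumulator.
import Mathlib
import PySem

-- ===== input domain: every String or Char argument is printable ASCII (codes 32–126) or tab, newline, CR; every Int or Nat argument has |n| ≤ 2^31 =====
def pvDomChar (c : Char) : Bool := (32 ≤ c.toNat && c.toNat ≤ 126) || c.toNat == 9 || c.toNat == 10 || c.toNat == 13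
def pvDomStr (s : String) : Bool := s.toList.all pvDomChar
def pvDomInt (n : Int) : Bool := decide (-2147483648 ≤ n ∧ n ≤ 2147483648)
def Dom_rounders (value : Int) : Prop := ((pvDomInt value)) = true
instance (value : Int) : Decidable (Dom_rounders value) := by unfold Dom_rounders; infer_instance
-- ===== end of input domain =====

-- B replaces A's string round-trip and in-place digit-list mutation by one arithmetic divmod loop with a scalar carry (simpler; equal cost).

-- ===== PORT A =====
-- loop body: 'if intVal[i] > 4: intVal[i] = 0; intVal[i+1] += 1 else: intVal[i] = 0'
def roundersStep (xs : List Int) (i : Int) : List Int :=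
  if 4 < PySem.List.pyGetD xs i 0 then
    let xs1 := PySem.List.pySetD xs i 0
    PySem.List.pySetD xs1 (i + 1) (PySem.List.pyGetD xs1 (i + 1) 0 + 1)
  else
    PySem.List.pySetD xs i 0

def rounders (value : Int) : Int :=
  let rev := ((PySem.Str.slice? (PySem.Int.toStr value) none none (-1)).getD "").toList
  let intVal := rev.map (fun elm => (PySem.Int.ofStr? (String.ofList [elm])).getD 0)
  let intVal2 := (PySem.List.pyRange 0 (PySem.List.len intVal - 1) 1).foldl roundersStep intVal
  let rev2 := (PySem.List.slice? intVal2 none none (-1)).getD []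
  (PySem.Int.ofStr? (PySem.Str.join "" (rev2.map PySem.Int.toStr))).getD 0

-- ===== PORT B =====
-- termination helper for the while loop (cited in decreasing_by)
theorem roundersAlt_floordiv_lt (n : Int) (h : 10 ≤ n) :
    (PySem.Int.floordiv n 10).toNat < n.toNat := by
  have h1 : PySem.Int.floordiv n 10 < n :=
    (PySem.Int.floordiv_lt_iff_lt_mul (a := n) (b := 10) (q := n) (by norm_num)).2 (by nlinarith)
  have h2 : (0 : Int) ≤ PySem.Int.floordiv n 10 :=
    (PySem.Int.le_floordiv_iff_mul_le (a := n) (b := 10) (q := 0) (by norm_num)).2 (by omega)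
  omega

-- while n >= 10: n, d = divmod(n, 10); carry = 1 if d + carry > 4 else 0; p *= 10
def roundersAltLoop (n p carry : Int) : Int × Int × Int :=
  if 10 ≤ n then
    let d := PySem.Int.mod n 10
    roundersAltLoop (PySem.Int.floordiv n 10) (p * 10) (if 4 < d + carry then 1 else 0)
  else
    (n, p, carry)
termination_by n.toNat
decreasing_by exact roundersAlt_floordiv_lt n (by assumption)

def rounders_alt (value : Int) : Int :=
  let t := roundersAltLoop value 1 0
  (t.1 + t.2.2) * t.2.1

-- ===== PRECONDITION & SPEC =====
-- Pre_ excludes negative values: there A raises ValueError (int('-') fails on the reversed string).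
def Pre_rounders (value : Int) : Prop := 0 ≤ value
instance (value : Int) : Decidable (Pre_rounders value) := by unfold Pre_rounders; infer_instance
def pvWitness_rounders : Int := 55

def Spec_rounders (value : Int) (out : Int) : Prop := out = rounders_alt value
instance (value : Int) (out : Int) : Decidable (Spec_rounders value out) := by unfold Spec_rounders; infer_instance

-- ===== CLAIM (what is proved, stated in full; the proofs are below) =====
def Claim_equal_rounders : Prop := ∀ (value : Int), Dom_rounders value → Pre_rounders value → Spec_rounders value (rounders value)

-- ===== LEMMAS AND PROOFS =====

def pvDlist (n : Nat) : List Nat := if n = 0 then [0] else Nat.digits 10 n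

def pvDlistZ (n : Nat) : List Int := (pvDlist n).map (fun d : Nat => (d : Int))

def pvRval (c : Int) : List Int → Int
  | [] => c
  | [d] => d + c
  | d :: e :: es => pvRval (if 4 < d + c then 1 else 0) (e :: es)

def pvLoopNat (xs : List Int) : List Int :=
  (List.range (xs.length - 1)).foldl (fun (l : List Int) (k : Nat) => roundersStep l (k : Int)) xs

theorem pvToDigitsCore_eq : ∀ (f n : Nat) (acc : List Char), 0 < n → n < f →
    Nat.toDigitsCore 10 f n acc = (Nat.digits 10 n).reverse.map Nat.digitChar ++ acc := by
  intro f
  induction f with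
  | zero => intro n acc h1 h2; omega
  | succ f ih =>
    intro n acc h1 h2
    rw [Nat.toDigitsCore]
    have hd := Nat.digits_def' (b := 10) (by norm_num) h1
    by_cases h0 : n / 10 = 0
    · simp [h0, hd]
    · have hlt : n / 10 < n := Nat.div_lt_self h1 (by norm_num)
      rw [if_neg h0, ih (n / 10) _ (Nat.pos_of_ne_zero h0) (by omega), hd]
      simp

theorem pvToChars_nat (n : Nat) :
    PySem.Int.toChars (n : Int) = (pvDlist n).reverse.map Nat.digitChar := by
  by_cases h0 : n = 0
  · subst h0; decide
  · have h1 : PySem.Int.toChars (n : Int) = Nat.toDigits 10 n := by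
      simp [PySem.Int.toChars]
    rw [h1, pvDlist, if_neg h0,
      show Nat.toDigits 10 n = Nat.toDigitsCore 10 (n + 1) n [] from rfl,
      pvToDigitsCore_eq (n + 1) n [] (Nat.pos_of_ne_zero h0) (by omega)]
    simp

theorem pvDigitCharVal : ∀ d : Nat, d ≤ 9 →
    (PySem.Int.ofStr? (String.ofList [Nat.digitChar d])).getD 0 = (d : Int) := by decide

theorem pvDlist_mem (n : Nat) : ∀ d ∈ pvDlist n, d ≤ 9 := by
  intro d hd
  by_cases h0 : n = 0
  · subst h0; simp [pvDlist] at hd; omega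
  · rw [pvDlist, if_neg h0] at hd
    have := Nat.digits_lt_base (by norm_num) hd
    omega

theorem pvStep_cons (x : Int) (xs : List Int) (k : Nat) :
    roundersStep (x :: xs) ((k : Int) + 1) = x :: roundersStep xs (k : Int) := by
  have h1 : ((k : Int) + 1) = ((k + 1 : Nat) : Int) := by push_cast; ring
  have h2 : ((k + 1 : Nat) : Int) + 1 = ((k + 2 : Nat) : Int) := by push_cast; ring
  simp only [roundersStep, h1, h2, PySem.List.pyGetD_natCast, PySem.List.pySetD_natCast]
  simp only [List.getD_cons_succ, List.set_cons_succ]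
  split <;> simp

theorem pvShift (ks : List Nat) : ∀ (x : Int) (xs : List Int),
    ks.foldl (fun (l : List Int) (k : Nat) => roundersStep l ((k : Int) + 1)) (x :: xs)
      = x :: ks.foldl (fun (l : List Int) (k : Nat) => roundersStep l (k : Int)) xs := by
  induction ks with
  | nil => intro x xs; rfl
  | cons k ks ih => intro x xs; simp only [List.foldl_cons, pvStep_cons, ih]

theorem pvStep_zero (d e : Int) (es : List Int) :
    roundersStep (d :: e :: es) 0 = 0 :: (e + (if 4 < d then 1 else 0)) :: es := by
  simp only [roundersStep, PySem.List.pyGetD_zero_cons]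
  split <;> simp [PySem.List.pySetD_of_nonneg, PySem.List.pyGetD_ofNat']

theorem pvRval_absorb (c e : Int) (es : List Int) :
    pvRval c (e :: es) = pvRval 0 ((e + c) :: es) := by
  cases es with
  | nil => simp [pvRval]
  | cons f fs => simp [pvRval, add_zero]

theorem pvLoopNat_cons : ∀ (es : List Int) (d : Int),
    pvLoopNat (d :: es) = List.replicate es.length 0 ++ [pvRval 0 (d :: es)] := by
  intro es
  induction es with
  | nil => intro d; simp [pvLoopNat, pvRval]
  | cons e es ih =>
    intro d
    unfold pvLoopNat
    simp only [List.length_cons, Nat.add_sub_cancel, List.range_succ_eq_map,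
      List.foldl_cons, List.foldl_map]
    have h0 : roundersStep (d :: e :: es) ((0 : Nat) : Int)
        = 0 :: (e + (if 4 < d then 1 else 0)) :: es := by
      rw [Nat.cast_zero, pvStep_zero]
    rw [h0]
    have hshift := pvShift (List.range es.length) 0 ((e + (if 4 < d then 1 else 0)) :: es)
    have hcast : ∀ (l : List Int) (k : Nat), roundersStep l ((k.succ : Nat) : Int)
        = roundersStep l ((k : Int) + 1) := by
      intro l k; norm_cast
    simp only [hcast]
    rw [hshift]
    have ihres := ih (e + (if 4 < d then 1 else 0))
    unfold pvLoopNat at ihres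
    simp only [List.length_cons, Nat.add_sub_cancel] at ihres
    rw [ihres]
    have hr : pvRval 0 (d :: e :: es) = pvRval 0 ((e + (if 4 < d then 1 else 0)) :: es) := by
      rw [show pvRval 0 (d :: e :: es) = pvRval (if 4 < d + 0 then 1 else 0) (e :: es) from rfl,
        add_zero, pvRval_absorb]
    rw [← hr, List.replicate_succ]
    simp

-- ===== B side =====
theorem pvFloordiv_natCast (n : Nat) : PySem.Int.floordiv (n : Int) 10 = ((n / 10 : Nat) : Int) := by
  show Int.fdiv _ _ = _
  rw [Int.fdiv_eq_ediv]
  simp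

theorem pvMod_natCast (n : Nat) : PySem.Int.mod (n : Int) 10 = ((n % 10 : Nat) : Int) := by
  show Int.fmod _ _ = _
  rw [Int.fmod_eq_emod]
  simp

theorem pvDlist_ne_nil (n : Nat) : pvDlist n ≠ [] := by
  by_cases h : n = 0
  · subst h; simp [pvDlist]
  · rw [pvDlist, if_neg h]; exact Nat.digits_ne_nil_iff_ne_zero.2 h

theorem pvDlist_small (n : Nat) (h : n < 10) : pvDlist n = [n] := by
  by_cases h0 : n = 0
  · subst h0; rfl
  · rw [pvDlist, if_neg h0, Nat.digits_def' (by norm_num) (Nat.pos_of_ne_zero h0),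
      Nat.div_eq_of_lt h, Nat.mod_eq_of_lt h]
    simp

theorem pvDlist_large (n : Nat) (h : 10 ≤ n) : pvDlist n = n % 10 :: pvDlist (n / 10) := by
  have h10 : n / 10 ≠ 0 := by
    have := Nat.div_le_div_right (c := 10) h
    simp at this; omega
  rw [pvDlist, if_neg (by omega), Nat.digits_def' (by norm_num) (by omega), pvDlist, if_neg h10]

theorem pvRval_cons (c d : Int) (rest : List Int) (h : rest ≠ []) :
    pvRval c (d :: rest) = pvRval (if 4 < d + c then 1 else 0) rest := by
  cases rest with
  | nil => exact absurd rfl h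
  | cons e es => rfl

theorem pvAltB : ∀ (n : Nat) (p c : Int),
    ((roundersAltLoop (n : Int) p c).1 + (roundersAltLoop (n : Int) p c).2.2)
        * (roundersAltLoop (n : Int) p c).2.1
      = pvRval c (pvDlistZ n) * p * 10 ^ ((pvDlist n).length - 1) := by
  intro n
  induction n using Nat.strong_induction_on with
  | _ n ih =>
    intro p c
    by_cases h : 10 ≤ n
    · rw [roundersAltLoop, if_pos (by exact_mod_cast h)]
      simp only [pvFloordiv_natCast, pvMod_natCast]
      rw [ih (n / 10) (Nat.div_lt_self (by omega) (by norm_num))]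
      rw [pvDlist_large n h]
      have hne : pvDlistZ (n / 10) ≠ [] := by
        intro hh
        rw [pvDlistZ] at hh
        exact pvDlist_ne_nil (n / 10) (List.map_eq_nil_iff.mp hh)
      have : pvDlistZ n = ((n % 10 : Nat) : Int) :: pvDlistZ (n / 10) := by
        simp [pvDlistZ, pvDlist_large n h]
      rw [this, pvRval_cons _ _ _ hne]
      have hlen : (n % 10 :: pvDlist (n / 10)).length - 1 = ((pvDlist (n / 10)).length - 1) + 1 := by
        have := pvDlist_ne_nil (n / 10)
        cases h' : pvDlist (n / 10) with
        | nil => exact absurd h' this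
        | cons a as => simp
      rw [hlen, pow_succ]
      ring
    · rw [roundersAltLoop, if_neg (by exact_mod_cast h)]
      rw [pvDlistZ, pvDlist_small n (by omega)]
      simp [pvRval]

-- bounds
theorem pvRval_bounds : ∀ (L : List Int) (c : Int), (∀ d ∈ L, 0 ≤ d ∧ d ≤ 9) →
    0 ≤ c → c ≤ 1 → 0 ≤ pvRval c L ∧ pvRval c L ≤ 10 := by
  intro L
  induction L with
  | nil => intro c _ h1 h2; simp [pvRval]; omega
  | cons d rest ih =>
    intro c hmem h1 h2
    cases rest with
    | nil =>
      have := hmem d (by simp)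
      simp [pvRval]; omega
    | cons e es =>
      rw [pvRval_cons _ _ _ (by simp)]
      refine ih _ (fun x hx => hmem x (by simp [hx])) ?_ ?_ <;> split <;> omega

theorem pvDlist_len_le (n : Nat) (h : n ≤ 2147483648) : (pvDlist n).length ≤ 10 := by
  by_cases h0 : n = 0
  · subst h0; simp [pvDlist]
  · rw [pvDlist, if_neg h0]
    exact (Nat.digits_length_le_iff (by norm_num) n).2 (by norm_num; omega)

-- final parse
theorem pvParse : ∀ m : Nat, m ≤ 10 → ∀ k : Nat, k ≤ 9 →
    PySem.Int.ofChars? (PySem.Int.toChars (m : Int) ++ List.replicate k '0')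
      = some ((m : Int) * 10 ^ k) := by decide

theorem pvJoinNil : ∀ ls : List (List Char), PySem.Chars.join [] ls = ls.flatten := by
  intro ls
  induction ls with
  | nil => simp [PySem.Chars.join_nil]
  | cons x r ih =>
    cases r with
    | nil => simp [PySem.Chars.join_singleton]
    | cons y rs => rw [PySem.Chars.join_cons_cons, ih]; simp

theorem pvDigitsA (n : Nat) :
    (((PySem.Str.slice? (PySem.Int.toStr (n : Int)) none none (-1)).getD "").toList).map
      (fun elm => (PySem.Int.ofStr? (String.ofList [elm])).getD 0) = pvDlistZ n := by
  rw [PySem.Str.slice?_none_none_neg_one]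
  simp only [Option.getD_some, String.toList_ofList]
  rw [PySem.Int.toList_toStr, pvToChars_nat, ← List.map_reverse, List.reverse_reverse,
    List.map_map]
  unfold pvDlistZ
  apply List.map_congr_left
  intro d hd
  exact pvDigitCharVal d (pvDlist_mem n d hd)

theorem pvJoinChars (rv : Int) (k : Nat) :
    (PySem.Str.join "" ((rv :: List.replicate k (0 : Int)).map PySem.Int.toStr)).toList
      = PySem.Int.toChars rv ++ List.replicate k '0' := by
  rw [PySem.Str.toList_join]
  rw [List.map_map]
  have h1 : (String.toList ∘ PySem.Int.toStr) = PySem.Int.toChars := by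
    funext x; exact PySem.Int.toList_toStr x
  rw [h1]
  have h2 : ("" : String).toList = [] := rfl
  rw [h2, pvJoinNil]
  simp only [List.map_cons, List.map_replicate]
  have h3 : PySem.Int.toChars 0 = ['0'] := rfl
  rw [h3]
  simp

theorem pvMain (n : Nat) (hn : n ≤ 2147483648) : rounders (n : Int) = rounders_alt (n : Int) := by
  obtain ⟨d, es, hde⟩ : ∃ d es, pvDlistZ n = d :: es := by
    cases h' : pvDlist n with
    | nil => exact absurd h' (pvDlist_ne_nil n)
    | cons a as => exact ⟨(a : Int), as.map (fun d : Nat => (d : Int)), by rw [pvDlistZ, h']; simp⟩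
  have hlenZ : (pvDlistZ n).length = (pvDlist n).length := by simp [pvDlistZ]
  have hlen10 : (pvDlist n).length ≤ 10 := pvDlist_len_le n hn
  have hk : es.length = (pvDlist n).length - 1 := by
    have := hlenZ; rw [hde] at this; simp at this; omega
  have hk9 : es.length ≤ 9 := by omega
  -- bounds on rv
  have hmem : ∀ x ∈ d :: es, 0 ≤ x ∧ x ≤ 9 := by
    intro x hx
    rw [← hde] at hx
    unfold pvDlistZ at hx
    obtain ⟨dd, hdd, rfl⟩ := List.mem_map.mp hx
    have := pvDlist_mem n dd hdd
    constructor <;> omega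
  have hrb := pvRval_bounds (d :: es) 0 hmem (le_refl 0) (by norm_num)
  set rv := pvRval 0 (d :: es) with hrv
  obtain ⟨m, hm, hm10⟩ : ∃ m : Nat, rv = (m : Int) ∧ m ≤ 10 := by
    refine ⟨rv.toNat, ?_, ?_⟩ <;> omega
  -- A side
  simp only [rounders]
  rw [pvDigitsA]
  have hlen : PySem.List.len (pvDlistZ n) = ((pvDlist n).length : Int) := by
    rw [PySem.List.len_eq, hlenZ]
  rw [hlen, PySem.List.pyRange_one]
  have ht : ((((pvDlist n).length : Int)) - 1 - 0).toNat = (pvDlist n).length - 1 := by omega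
  rw [ht, List.foldl_map]
  simp only [zero_add]
  rw [hde]
  have hfold : (List.range ((pvDlist n).length - 1)).foldl
      (fun (l : List Int) (k : Nat) => roundersStep l (k : Int)) (d :: es)
      = pvLoopNat (d :: es) := by
    unfold pvLoopNat
    rw [show (d :: es).length - 1 = es.length by simp, hk]
  rw [hfold, pvLoopNat_cons es d, PySem.List.slice?_none_none_neg_one]
  simp only [Option.getD_some, List.reverse_append, List.reverse_replicate,
    List.reverse_cons, List.reverse_nil, List.nil_append, List.cons_append]
  have hofstr : ∀ s : String, PySem.Int.ofStr? s = PySem.Int.ofChars? s.toList := fun _ => rfl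
  rw [hofstr, pvJoinChars, ← hrv, hm, pvParse m hm10 es.length hk9]
  -- B side
  simp only [rounders_alt]
  have hB := pvAltB n 1 0
  simp only [mul_one] at hB
  rw [hB, hde, ← hrv, hm, ← hk]
  simp

-- ===== VERDICT (by name: the statement is the Claim_ definition above) =====
theorem rounders_spec : Claim_equal_rounders := by
  intro value hdom hpre
  unfold Spec_rounders
  have hv : ((value.toNat : Nat) : Int) = value := Int.toNat_of_nonneg hpre
  have hn : value.toNat ≤ 2147483648 := by
    simp only [Dom_rounders, pvDomInt, decide_eq_true_eq] at hdom
    omega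
  rw [← hv]
  exact pvMain value.toNat hn
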